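-- pv_equiv track=rewrite | github.com/PGHM/braintrain | python/advent2017/day_21/21.py | divide_divisor_height_grid
-- ===== SOURCE A (Python) =====
-- def divide_divisor_height_grid(grid, divisor, sub_grids):
--     if len(grid[0]) == 0:
--         return sub_grids
--
--     new_sub_grid = [row[:divisor] for row in grid]
--     stripped_grid = [row[divisor:] for row in grid]
--     return divide_divisor_height_grid(
--         stripped_grid,
--         divisor,
--         sub_grids + [new_sub_grid]
--     )
-- ===== SOURCE B (Python) =====
-- def divide_divisor_height_grid(grid, divisor, sub_grids):
--     width = len(grid[0])
--     return sub_grids + [[row[i:i + divisor] for row in grid]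
--                         for i in range(0, width, divisor)]
-- ===== Notes on version B (the rewrite author's own statement) =====
-- stated objective: simpler
-- what changed: Replaces the recursive column-peeling (which rebuilds the whole remaining grid and the accumulator on every step) by a single comprehension over the chunk start offsets range(0, width, divisor), slicing each chunk directly out of the original rows.
-- outside the precondition, e.g. on divide_divisor_height_grid(['', ''], 0, []): A returns [], B raises ValueError
import Mathlib
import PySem

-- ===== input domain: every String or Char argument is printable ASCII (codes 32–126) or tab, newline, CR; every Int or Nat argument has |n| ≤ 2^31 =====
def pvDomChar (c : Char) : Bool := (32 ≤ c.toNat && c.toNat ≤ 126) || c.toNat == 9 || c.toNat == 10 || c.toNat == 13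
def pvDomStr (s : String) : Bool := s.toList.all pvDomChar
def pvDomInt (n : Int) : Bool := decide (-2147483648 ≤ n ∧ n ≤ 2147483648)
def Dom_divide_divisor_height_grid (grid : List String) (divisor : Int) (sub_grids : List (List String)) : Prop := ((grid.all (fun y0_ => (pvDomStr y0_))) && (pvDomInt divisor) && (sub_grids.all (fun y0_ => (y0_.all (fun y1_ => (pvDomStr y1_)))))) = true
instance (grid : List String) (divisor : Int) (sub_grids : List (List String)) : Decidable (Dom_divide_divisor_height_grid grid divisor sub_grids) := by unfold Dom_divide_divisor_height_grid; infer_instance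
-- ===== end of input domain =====

-- B replaces A's recursive column peeling by one comprehension over the chunk start
-- offsets range(0, width, divisor); return values agree on Pre_ (proved below).

-- ===== PORT A =====
-- A's recursion, with a fuel counter as a totality device only: under Pre_ the fuel
-- (first-row length + 1) is more than the number of recursive calls, so it never runs out.
def divideLoopA : Nat → List String → Int → List (List String) → List (List String)
  | 0, _, _, sub_grids => sub_grids
  | fuel + 1, grid, divisor, sub_grids =>
    if PySem.Str.len grid.headI = 0 then sub_grids
    else
      let new_sub_grid := grid.map (fun row => PySem.Str.slice row none (some divisor))
      let stripped_grid := grid.map (fun row => PySem.Str.slice row (some divisor) none)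
      divideLoopA fuel stripped_grid divisor (sub_grids ++ [new_sub_grid])

def divide_divisor_height_grid (grid : List String) (divisor : Int) (sub_grids : List (List String)) : List (List String) :=
  divideLoopA (grid.headI.toList.length + 1) grid divisor sub_grids

-- ===== PORT B =====
def divide_divisor_height_grid_alt (grid : List String) (divisor : Int) (sub_grids : List (List String)) : List (List String) :=
  match grid with
  | [] => sub_grids  -- Python B raises IndexError here (outside Pre_)
  | r :: _ =>
    let width := PySem.Str.len r
    sub_grids ++ (PySem.List.pyRange 0 width divisor).map
      (fun i => grid.map (fun row => PySem.Str.slice row (some i) (some (i + divisor))))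

-- ===== PRECONDITION & SPEC =====
-- Pre_ excludes: the empty grid (A raises IndexError); divisor ≤ 0 with a nonempty first
-- row (A recurses forever); and divisor = 0 with an empty first row, where A returns
-- sub_grids but B's range(0, 0, 0) raises ValueError.
def Pre_divide_divisor_height_grid (grid : List String) (divisor : Int) (sub_grids : List (List String)) : Prop :=
  grid ≠ [] ∧ (1 ≤ divisor ∨ (grid.headI = "" ∧ divisor ≠ 0))
instance (grid : List String) (divisor : Int) (sub_grids : List (List String)) : Decidable (Pre_divide_divisor_height_grid grid divisor sub_grids) := by unfold Pre_divide_divisor_height_grid; infer_instance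

def pvWitness_divide_divisor_height_grid : List String × Int × List (List String) :=
  (["abcd", "efgh"], 3, [["x"]])

def Spec_divide_divisor_height_grid (grid : List String) (divisor : Int) (sub_grids : List (List String)) (out : List (List String)) : Prop := out = divide_divisor_height_grid_alt grid divisor sub_grids
instance (grid : List String) (divisor : Int) (sub_grids : List (List String)) (out : List (List String)) : Decidable (Spec_divide_divisor_height_grid grid divisor sub_grids out) := by unfold Spec_divide_divisor_height_grid; infer_instance

-- ===== CLAIM (what is proved, stated in full; the proofs are below) =====
def Claim_equal_divide_divisor_height_grid : Prop := ∀ (grid : List String) (divisor : Int) (sub_grids : List (List String)), Dom_divide_divisor_height_grid grid divisor sub_grids → Pre_divide_divisor_height_grid grid divisor sub_grids → Spec_divide_divisor_height_grid grid divisor sub_grids (divide_divisor_height_grid grid divisor sub_grids)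

-- ===== LEMMAS AND PROOFS =====

-- range(0,b,s) for 0 < s, shifted by s
lemma pyRange_shift (b s : Int) (hs : 0 < s) {α : Type} (f : Int → α) :
    (PySem.List.pyRange 0 b s).map (fun i => f (i + s))
      = (PySem.List.pyRange s (b + s) s).map f := by
  rw [PySem.List.pyRange_of_pos _ _ hs, PySem.List.pyRange_of_pos _ _ hs,
      List.map_map, List.map_map]
  have hc : (if (0:Int) < b then ((b - 0 + s - 1) / s).toNat else 0)
      = (if s < b + s then ((b + s - s + s - 1) / s).toNat else 0) := by
    by_cases h : (0:Int) < b
    · rw [if_pos h, if_pos (by omega)]; ring_nf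
    · rw [if_neg h, if_neg (by omega)]
  rw [hc]
  exact List.map_congr_left (fun k _ => by simp only [Function.comp_apply]; ring_nf)

lemma pyRange_pos_cons (a b s : Int) (hs : 0 < s) (hab : a < b) :
    PySem.List.pyRange a b s = a :: PySem.List.pyRange (a + s) b s := by
  rw [PySem.List.pyRange_of_pos _ _ hs, PySem.List.pyRange_of_pos _ _ hs]
  rw [if_pos hab]
  have h1 : 1 ≤ (b - a + s - 1) / s := by
    rw [Int.le_ediv_iff_mul_le hs]; omega
  by_cases h2 : a + s < b
  · rw [if_pos h2]
    have hnum : b - a + s - 1 = (b - (a + s) + s - 1) + 1 * s := by ring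
    have hdiv : (b - a + s - 1) / s = (b - (a + s) + s - 1) / s + 1 := by
      rw [hnum, Int.add_mul_ediv_right _ _ (by omega)]
    have hn : ((b - a + s - 1) / s).toNat = ((b - (a + s) + s - 1) / s).toNat + 1 := by
      have h0 : 0 ≤ (b - (a + s) + s - 1) / s := Int.ediv_nonneg (by omega) (by omega)
      omega
    rw [hn, List.range_succ_eq_map, List.map_cons, List.map_map]
    refine congrArg₂ _ (by ring_nf) ?_
    exact List.map_congr_left (fun k _ => by simp only [Function.comp_apply]; push_cast; ring)
  · rw [if_neg h2]
    have hlt : (b - a + s - 1) / s < 2 := by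
      rw [Int.ediv_lt_iff_lt_mul hs]; omega
    have hn : ((b - a + s - 1) / s).toNat = 1 := by omega
    rw [hn]
    simp

lemma pyRange_pos_nil (a b s : Int) (hs : 0 < s) (hab : b ≤ a) :
    PySem.List.pyRange a b s = [] := by
  rw [PySem.List.pyRange_of_pos _ _ hs, if_neg (by omega)]
  simp

-- slicing a chunk out of a stripped row = slicing the shifted chunk out of the row
lemma slice_strip (row : String) (d i : Int) (hd : 0 ≤ d) (hi : 0 ≤ i) :
    PySem.Str.slice (PySem.Str.slice row (some d) none) (some i) (some (i + d))
      = PySem.Str.slice row (some (i + d)) (some (i + d + d)) := by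
  apply String.toList_inj.mp
  rw [PySem.Str.toList_slice, PySem.Str.toList_slice, PySem.Str.toList_slice]
  simp only [PySem.Chars.slice]
  rw [PySem.List.slice_from _ hd,
      PySem.List.slice_toNat _ hi (by omega),
      PySem.List.slice_toNat _ (by omega) (by omega)]
  rw [List.drop_drop]
  have h1 : (i + d).toNat - i.toNat = d.toNat := by omega
  have h2 : (i + d + d).toNat - (i + d).toNat = d.toNat := by omega
  have h3 : d.toNat + i.toNat = (i + d).toNat := by omega
  rw [h1, h2, h3]

lemma loopA_eq (d : Int) (hd : 1 ≤ d) :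
    ∀ (w fuel : Nat) (r : String) (rest : List String) (sub : List (List String)),
      r.toList.length = w → w < fuel →
      divideLoopA fuel (r :: rest) d sub
        = sub ++ (PySem.List.pyRange 0 (w : Int) d).map
            (fun i => (r :: rest).map (fun row => PySem.Str.slice row (some i) (some (i + d)))) := by
  intro w
  induction w using Nat.strong_induction_on with
  | _ w ih =>
    intro fuel r rest sub hw hfuel
    match fuel with
    | 0 => omega
    | fuel + 1 =>
      by_cases hw0 : w = 0
      · subst hw0
        have hr : PySem.Str.len ((r :: rest).headI) = 0 := by
          simp [PySem.Str.len_eq, List.headI, hw]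
        rw [divideLoopA, if_pos hr]
        have hnil : PySem.List.pyRange 0 0 d = [] := pyRange_pos_nil 0 0 d (by omega) (by omega)
        simp [hnil]
      · have hr : ¬ PySem.Str.len ((r :: rest).headI) = 0 := by
          simp [PySem.Str.len_eq, List.headI, hw]; omega
        rw [divideLoopA, if_neg hr]
        set stripR := PySem.Str.slice r (some d) none with hsR
        have hlen : stripR.toList.length = w - d.toNat := by
          rw [hsR, PySem.Str.toList_slice]
          simp only [PySem.Chars.slice]
          rw [PySem.List.slice_from _ (by omega)]
          simp [hw]
        have hstep :
            (r :: rest).map (fun row => PySem.Str.slice row (some d) none)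
              = stripR :: rest.map (fun row => PySem.Str.slice row (some d) none) := by
          simp [hsR]
        rw [hstep]
        rw [ih (w - d.toNat) (by omega) fuel stripR _ _ hlen (by omega)]
        rw [← hstep]
        -- rewrite each stripped chunk as a shifted chunk of the original grid
        have hmap :
            (PySem.List.pyRange 0 ((w - d.toNat : Nat) : Int) d).map
              (fun i => ((r :: rest).map (fun row => PySem.Str.slice row (some d) none)).map
                (fun row => PySem.Str.slice row (some i) (some (i + d))))
            = (PySem.List.pyRange 0 ((w - d.toNat : Nat) : Int) d).map
              (fun i => (r :: rest).map
                (fun row => PySem.Str.slice row (some (i + d)) (some (i + d + d)))) := by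
          refine List.map_congr_left (fun i hi => ?_)
          have h0i : 0 ≤ i :=
            ((PySem.List.mem_pyRange_iff_of_pos (by omega) i).mp hi).1
          rw [List.map_map]
          exact List.map_congr_left (fun row _ => slice_strip row d i (by omega) h0i)
        rw [hmap]
        have hshift :
            (PySem.List.pyRange 0 ((w - d.toNat : Nat) : Int) d).map
              (fun i => (r :: rest).map
                (fun row => PySem.Str.slice row (some (i + d)) (some (i + d + d))))
            = (PySem.List.pyRange d (((w - d.toNat : Nat) : Int) + d) d).map
              (fun i => (r :: rest).map
                (fun row => PySem.Str.slice row (some i) (some (i + d)))) := by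
          exact pyRange_shift _ d (by omega)
            (f := fun i => (r :: rest).map (fun row => PySem.Str.slice row (some i) (some (i + d))))
        rw [hshift]
        have htail : PySem.List.pyRange d (((w - d.toNat : Nat) : Int) + d) d
            = PySem.List.pyRange d (w : Int) d := by
          by_cases hdw : d.toNat ≤ w
          · have : (((w - d.toNat : Nat) : Int) + d) = (w : Int) := by omega
            rw [this]
          · rw [pyRange_pos_nil _ _ _ (by omega) (by omega),
                pyRange_pos_nil _ _ _ (by omega) (by omega)]
        have hcons : PySem.List.pyRange 0 (w : Int) d = 0 :: PySem.List.pyRange d (w : Int) d := by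
          simpa using pyRange_pos_cons 0 (w : Int) d (by omega) (by omega)
        rw [htail, hcons]
        have hchunk0 : ∀ row : String,
            PySem.Str.slice row none (some d) = PySem.Str.slice row (some 0) (some d) := by
          intro row
          apply String.toList_inj.mp
          rw [PySem.Str.toList_slice, PySem.Str.toList_slice]
          simp only [PySem.Chars.slice]
          rw [PySem.List.slice_toNat _ (by omega) (by omega), PySem.List.slice_to _ (by omega)]
          simp
        simp [hchunk0]

-- ===== VERDICT (by name: the statement is the Claim_ definition above) =====
theorem divide_divisor_height_grid_spec : Claim_equal_divide_divisor_height_grid := by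
  intro grid divisor sub_grids _ hpre
  obtain ⟨hne, hcase⟩ := hpre
  match grid with
  | [] => exact absurd rfl hne
  | r :: rest =>
    unfold Spec_divide_divisor_height_grid divide_divisor_height_grid divide_divisor_height_grid_alt
    rcases hcase with hd | ⟨hr0, hd0⟩
    · rw [loopA_eq divisor hd r.toList.length _ r rest sub_grids rfl (by simp [List.headI])]
      simp [PySem.Str.len_eq]
    · have hr : r = "" := by simpa [List.headI] using hr0
      subst hr
      simp [divideLoopA, PySem.Str.len_eq, List.headI, PySem.List.pyRange]
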